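-- pv_equiv track=rewrite | github.com/raulpenaguiao/discrete_signature_varieties_macaulay2 | degree_moebius.py | initialize_arithmetic_functions
-- ===== SOURCE A (Python) =====
-- def initialize_arithmetic_functions(LIM=500):
--     """
--     Initialize arithmetic functions for binomial coefficients and the Möbius function.
--     """
--
--     # Initialize a 2D list `binom` to store binomial coefficients
--     binom = [[0 for i in range(LIM)] for j in range(LIM)]
--     binom[0][0] = 1
--
--     # Compute binomial coefficients using Pascal's triangle
--     for i in range(1, LIM-1):
--         binom[i][0] = 1
--         for j in range(1, i+1):
--             binom[i][j] = binom[i-1][j] + binom[i-1][j-1]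
--
--     # Initialize the Möbius function `mu` and a list `primeQ` to track prime numbers
--     mu = [1 for _ in range(LIM+1)]
--     primeQ = [True for _ in range(LIM+1)]
--
--     # Set initial values for `mu` and `primeQ`
--     mu[0] = 0
--     primeQ[0] = False
--     primeQ[1] = False
--
--     # Compute the Möbius function and mark non-prime numbers
--     for i in range(2, LIM+1):
--         if primeQ[i]:
--             # Mark multiples of `i` as non-prime and update `mu`
--             for j in range(i, LIM+1, i):
--                 primeQ[j] = False
--                 mu[j] *= -1
--             # Set `mu[j]` to 0 for multiples of `i^2`
--             for j in range(i*i, LIM+1, i*i):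
--                 mu[j] = 0
--
--     return mu, primeQ, binom
-- ===== SOURCE B (Python) =====
-- import math
--
--
-- def initialize_arithmetic_functions(LIM=500):
--     """
--     Initialize arithmetic functions for binomial coefficients and the Möbius function.
--     """
--     # Binomial coefficient table: each entry computed directly in closed form.
--     binom = [[0] * LIM for _ in range(LIM)]
--     binom[0][0] = 1
--     for i in range(1, LIM - 1):
--         for j in range(i + 1):
--             binom[i][j] = math.comb(i, j)
--
--     # Möbius function and prime sieve.
--     mu = [1 for _ in range(LIM + 1)]
--     primeQ = [True for _ in range(LIM + 1)]
--     mu[0] = 0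
--     primeQ[0] = False
--     primeQ[1] = False
--     for i in range(2, LIM + 1):
--         if primeQ[i]:
--             for j in range(i, LIM + 1, i):
--                 primeQ[j] = False
--                 mu[j] *= -1
--             for j in range(i * i, LIM + 1, i * i):
--                 mu[j] = 0
--
--     return mu, primeQ, binom
-- ===== Notes on version B (the rewrite author's own statement) =====
-- stated objective: alternative
-- what changed: Each binomial-table entry is computed independently in closed form with math.comb over the same loop bounds, instead of Pascal's additive recurrence that reads the previous row; the Moebius/prime sieve block is unchanged. Pre_ excludes LIM <= 0, on which A raises IndexError (binom[0][0] on an empty table / primeQ[1] on a too-short list).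
-- outside the precondition, e.g. on initialize_arithmetic_functions(0): A raises IndexError, B raises IndexError; on initialize_arithmetic_functions(-1): A raises IndexError, B raises IndexError
import Mathlib
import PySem

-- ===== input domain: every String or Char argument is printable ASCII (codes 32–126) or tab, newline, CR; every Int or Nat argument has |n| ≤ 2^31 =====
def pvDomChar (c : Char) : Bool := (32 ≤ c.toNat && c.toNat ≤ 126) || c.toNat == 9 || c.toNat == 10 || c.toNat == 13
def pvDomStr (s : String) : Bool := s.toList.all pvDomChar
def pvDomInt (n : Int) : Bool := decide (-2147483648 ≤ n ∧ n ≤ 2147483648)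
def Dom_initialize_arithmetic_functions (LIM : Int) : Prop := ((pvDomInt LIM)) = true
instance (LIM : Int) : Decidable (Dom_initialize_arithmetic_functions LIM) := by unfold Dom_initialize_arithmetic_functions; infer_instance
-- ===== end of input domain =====

-- B computes each binomial-table entry independently in closed form (math.comb) over the same
-- loop bounds, instead of A's Pascal recurrence reading the previous row; the Möbius/prime sieve
-- block is textually identical in Source A and Source B and is transliterated once (pvMuPrimeQ), used by both ports.

-- ===== PORT A =====
-- the Möbius/primeQ sieve block, identical source text in Source A and Source B
def pvMuPrimeQ (LIM : Int) : List Int × List Bool :=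
  let mu : List Int := (PySem.List.pyRange 0 (LIM+1) 1).map (fun _ => 1)
  let primeQ : List Bool := (PySem.List.pyRange 0 (LIM+1) 1).map (fun _ => true)
  let mu := PySem.List.pySetD mu 0 0                 -- mu[0] = 0 (IndexError when LIM < 0: excluded by Pre_)
  let primeQ := PySem.List.pySetD primeQ 0 false
  let primeQ := PySem.List.pySetD primeQ 1 false     -- IndexError when LIM < 1: excluded by Pre_
  (PySem.List.pyRange 2 (LIM+1) 1).foldl (fun (s : List Int × List Bool) i =>
    if PySem.List.pyGetD s.2 i false then
      let s1 := (PySem.List.pyRange i (LIM+1) i).foldl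
        (fun (s : List Int × List Bool) j =>
          (PySem.List.pySetD s.1 j (PySem.List.pyGetD s.1 j 0 * (-1)),   -- mu[j] *= -1
           PySem.List.pySetD s.2 j false)) s                             -- primeQ[j] = False
      ((PySem.List.pyRange (i*i) (LIM+1) (i*i)).foldl
        (fun (m : List Int) j => PySem.List.pySetD m j 0) s1.1, s1.2)    -- mu[j] = 0
    else s) (mu, primeQ)

-- body of A's outer Pascal loop (for one row index i)
def pvOuterBody (b : List (List Int)) (i : Int) : List (List Int) :=
  let b := PySem.List.pySetD b i (PySem.List.pySetD (PySem.List.pyGetD b i []) 0 1)   -- binom[i][0] = 1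
  (PySem.List.pyRange 1 (i+1) 1).foldl (fun b j =>
    PySem.List.pySetD b i (PySem.List.pySetD (PySem.List.pyGetD b i []) j
      (PySem.List.pyGetD (PySem.List.pyGetD b (i-1) []) j 0 +
       PySem.List.pyGetD (PySem.List.pyGetD b (i-1) []) (j-1) 0))) b    -- binom[i][j] = binom[i-1][j] + binom[i-1][j-1]

-- A's binomial table: zero table, binom[0][0] = 1, then Pascal's recurrence
def pvBinomA (LIM : Int) : List (List Int) :=
  let binom : List (List Int) :=
    (PySem.List.pyRange 0 LIM 1).map (fun _ => (PySem.List.pyRange 0 LIM 1).map (fun _ => (0:Int)))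
  let binom := PySem.List.pySetD binom 0
    (PySem.List.pySetD (PySem.List.pyGetD binom 0 []) 0 1)   -- binom[0][0] = 1 (IndexError when LIM ≤ 0: excluded by Pre_)
  (PySem.List.pyRange 1 (LIM-1) 1).foldl pvOuterBody binom

def initialize_arithmetic_functions (LIM : Int) : List Int × List Bool × List (List Int) :=
  let binom := pvBinomA LIM
  let s := pvMuPrimeQ LIM
  (s.1, s.2, binom)

-- ===== PORT B =====
-- B's binomial table: zero table, binom[0][0] = 1, then binom[i][j] = math.comb(i, j)
def pvBinomAlt (LIM : Int) : List (List Int) :=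
  let binom : List (List Int) :=
    (PySem.List.pyRange 0 LIM 1).map (fun _ => PySem.List.pyRepeat [(0:Int)] LIM)   -- [[0]*LIM for _ in range(LIM)]
  let binom := PySem.List.pySetD binom 0
    (PySem.List.pySetD (PySem.List.pyGetD binom 0 []) 0 1)   -- binom[0][0] = 1
  (PySem.List.pyRange 1 (LIM-1) 1).foldl (fun b i =>
    (PySem.List.pyRange 0 (i+1) 1).foldl (fun b j =>
      PySem.List.pySetD b i (PySem.List.pySetD (PySem.List.pyGetD b i []) j
        ((i.toNat.choose j.toNat : Nat) : Int))) b) binom    -- binom[i][j] = math.comb(i, j)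

def initialize_arithmetic_functions_alt (LIM : Int) : List Int × List Bool × List (List Int) :=
  let binom := pvBinomAlt LIM
  let s := pvMuPrimeQ LIM
  (s.1, s.2, binom)

-- ===== PRECONDITION & SPEC =====
-- A raises IndexError for LIM ≤ 0 (binom[0][0] on an empty table / primeQ[1] on a short list)
def Pre_initialize_arithmetic_functions (LIM : Int) : Prop := 1 ≤ LIM
instance (LIM : Int) : Decidable (Pre_initialize_arithmetic_functions LIM) := by
  unfold Pre_initialize_arithmetic_functions; infer_instance
def pvWitness_initialize_arithmetic_functions : Int := 3

def Spec_initialize_arithmetic_functions (LIM : Int) (out : List Int × List Bool × List (List Int)) : Prop := out = initialize_arithmetic_functions_alt LIM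
instance (LIM : Int) (out : List Int × List Bool × List (List Int)) : Decidable (Spec_initialize_arithmetic_functions LIM out) := by unfold Spec_initialize_arithmetic_functions; infer_instance

-- ===== CLAIM (what is proved, stated in full; the proofs are below) =====
def Claim_equal_initialize_arithmetic_functions : Prop := ∀ (LIM : Int), Dom_initialize_arithmetic_functions LIM → Pre_initialize_arithmetic_functions LIM → Spec_initialize_arithmetic_functions LIM (initialize_arithmetic_functions LIM)

-- ===== LEMMAS AND PROOFS =====

-- the row of binomial coefficients [C(i,0), …, C(i,n-1)], the zero row, and the table state
-- after rows 1..m of either binomial loop have run (rows 0..m are choose-rows, the rest zero)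
def pvCrow (n i : Nat) : List Int := (List.range n).map (fun j => ((i.choose j : Nat) : Int))
def pvZrow (n : Nat) : List Int := List.replicate n (0:Int)
def pvTab (n m : Nat) : List (List Int) := (List.range n).map (fun k => if k ≤ m then pvCrow n k else pvZrow n)
-- row r with positions 1..p overwritten by g (A's inner loop starts at j = 1)
def pvRowFill (g : Nat → Int) (r : List Int) : Nat → List Int
  | 0 => r
  | p+1 => (pvRowFill g r p).set (p+1) (g (p+1))
-- row r with positions 0..p overwritten by g (B's inner loop starts at j = 0)
def pvRowFillB (g : Nat → Int) (r : List Int) : Nat → List Int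
  | 0 => r.set 0 (g 0)
  | p+1 => (pvRowFillB g r p).set (p+1) (g (p+1))

theorem pvTab_getD (n m k : Nat) (hk : k < n) :
    (pvTab n m).getD k [] = if k ≤ m then pvCrow n k else pvZrow n := by
  simp [pvTab, List.getD_eq_getElem?_getD, hk]

theorem pvSet_getD_self {α : Type} (l : List α) (k : Nat) (x d : α) (hk : k < l.length) :
    (l.set k x).getD k d = x := by
  simp [List.getD_eq_getElem?_getD, hk]

theorem pvSet_getD_ne {α : Type} (l : List α) (i j : Nat) (x d : α) (hne : i ≠ j) :
    (l.set i x).getD j d = l.getD j d := by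
  simp [List.getD_eq_getElem?_getD, List.getElem?_set_ne hne]

theorem pvCrow_getD (n i k : Nat) (hk : k < n) :
    (pvCrow n i).getD k 0 = ((i.choose k : Nat) : Int) := by
  simp [pvCrow, List.getD_eq_getElem?_getD, hk]

theorem pvR0 (n : Nat) (_hn : 1 ≤ n) : (pvZrow n).set 0 1 = pvCrow n 0 := by
  apply List.ext_getElem (by simp [pvZrow, pvCrow])
  intro k h1 h2
  simp only [pvZrow, pvCrow, List.getElem_set, List.getElem_replicate, List.getElem_map,
    List.getElem_range]
  rcases Nat.eq_zero_or_pos k with hk | hk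
  · subst hk; simp
  · rw [if_neg (by omega)]
    simp [Nat.choose_eq_zero_iff.mpr hk]

theorem pvRowFill_length (g : Nat → Int) (r : List Int) (p : Nat) :
    (pvRowFill g r p).length = r.length := by
  induction p with
  | zero => rfl
  | succ p ih => simp [pvRowFill, ih]

theorem pvRowFill_getElem (g : Nat → Int) (r : List Int) (p k : Nat) (hk : k < r.length) :
    (pvRowFill g r p)[k]'(by rw [pvRowFill_length]; exact hk) =
      if 1 ≤ k ∧ k ≤ p then g k else r[k] := by
  induction p with
  | zero => rw [if_neg (by omega)]; rfl
  | succ p ih =>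
    simp only [pvRowFill]
    rw [List.getElem_set]
    by_cases hpk : p + 1 = k
    · subst hpk; rw [if_pos rfl, if_pos (by omega)]
    · rw [if_neg hpk, ih]
      by_cases hc : 1 ≤ k ∧ k ≤ p
      · rw [if_pos hc, if_pos (by omega)]
      · rw [if_neg hc, if_neg (by omega)]

theorem pvRowFillB_length (g : Nat → Int) (r : List Int) (p : Nat) :
    (pvRowFillB g r p).length = r.length := by
  induction p with
  | zero => simp [pvRowFillB]
  | succ p ih => simp [pvRowFillB, ih]

theorem pvRowFillB_getElem (g : Nat → Int) (r : List Int) (p k : Nat) (hk : k < r.length) :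
    (pvRowFillB g r p)[k]'(by rw [pvRowFillB_length]; exact hk) =
      if k ≤ p then g k else r[k] := by
  induction p with
  | zero =>
    simp only [pvRowFillB]
    rw [List.getElem_set]
    by_cases hk0 : 0 = k
    · subst hk0; rw [if_pos rfl, if_pos (le_refl 0)]
    · rw [if_neg hk0, if_neg (by omega)]
  | succ p ih =>
    simp only [pvRowFillB]
    rw [List.getElem_set]
    by_cases hpk : p + 1 = k
    · subst hpk; rw [if_pos rfl, if_pos (by omega)]
    · rw [if_neg hpk, ih]
      by_cases hc : k ≤ p
      · rw [if_pos hc, if_pos (by omega)]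
      · rw [if_neg hc, if_neg (by omega)]

theorem pvRowFill_eq_crow (n m : Nat) (_hn : m + 1 < n) :
    pvRowFill (fun jj => (pvCrow n m).getD jj 0 + (pvCrow n m).getD (jj-1) 0)
      ((pvZrow n).set 0 1) (m+1) = pvCrow n (m+1) := by
  apply List.ext_getElem (by simp [pvRowFill_length, pvZrow, pvCrow])
  intro k h1 h2
  have hkn : k < n := by simpa [pvCrow] using h2
  have hr : k < ((pvZrow n).set 0 1).length := by simp [pvZrow]; omega
  rw [pvRowFill_getElem _ _ _ _ hr]
  have hrhs : (pvCrow n (m+1))[k]'h2 = (((m+1).choose k : Nat) : Int) := by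
    simp [pvCrow]
  rw [hrhs]
  by_cases hc : 1 ≤ k ∧ k ≤ m + 1
  · rw [if_pos hc]
    rw [pvCrow_getD n m k hkn, pvCrow_getD n m (k-1) (by omega)]
    obtain ⟨t, rfl⟩ : ∃ t, k = t + 1 := ⟨k - 1, by omega⟩
    rw [Nat.choose_succ_succ' m t]
    push_cast
    ring
  · rw [if_neg hc]
    simp only [pvZrow, List.getElem_set, List.getElem_replicate]
    rcases Nat.eq_zero_or_pos k with hk | hk
    · subst hk; simp
    · rw [if_neg (by omega)]
      have : m + 1 < k := by omega
      simp [Nat.choose_eq_zero_of_lt this]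

theorem pvRowFillB_eq_crow (n m : Nat) (_hn : m + 1 < n) :
    pvRowFillB (fun jj => (((m+1).choose jj : Nat) : Int)) (pvZrow n) (m+1) = pvCrow n (m+1) := by
  apply List.ext_getElem (by simp [pvRowFillB_length, pvZrow, pvCrow])
  intro k h1 h2
  have hkn : k < n := by simpa [pvCrow] using h2
  have hr : k < (pvZrow n).length := by simp [pvZrow]; omega
  rw [pvRowFillB_getElem _ _ _ _ hr]
  have hrhs : (pvCrow n (m+1))[k]'h2 = (((m+1).choose k : Nat) : Int) := by
    simp [pvCrow]
  rw [hrhs]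
  by_cases hc : k ≤ m + 1
  · rw [if_pos hc]
  · rw [if_neg hc]
    simp only [pvZrow, List.getElem_replicate]
    have : m + 1 < k := by omega
    simp [Nat.choose_eq_zero_of_lt this]

theorem pvInner (n m : Nat) (_hn : m + 1 < n) (p : Nat) (r : List Int) :
    (PySem.List.pyRange 1 (1 + (p:Int)) 1).foldl
      (fun b j => PySem.List.pySetD b (((m+1 : Nat)) : Int)
        (PySem.List.pySetD (PySem.List.pyGetD b (((m+1:Nat)):Int) []) j
          (PySem.List.pyGetD (PySem.List.pyGetD b ((((m+1:Nat)):Int)-1) []) j 0 +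
           PySem.List.pyGetD (PySem.List.pyGetD b ((((m+1:Nat)):Int)-1) []) (j-1) 0)))
      ((pvTab n m).set (m+1) r)
    = (pvTab n m).set (m+1)
        (pvRowFill (fun jj => (pvCrow n m).getD jj 0 + (pvCrow n m).getD (jj-1) 0) r p) := by
  have hlen : (pvTab n m).length = n := by simp [pvTab]
  induction p with
  | zero =>
    rw [PySem.List.pyRange_one_eq_nil (by omega)]
    rfl
  | succ p ih =>
    rw [show ((1:Int) + ((p+1:Nat):Int)) = (1 + ((p:Nat):Int)) + 1 by push_cast; ring,
        PySem.List.pyRange_one_succ_right (by omega), List.foldl_append, ih]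
    simp only [List.foldl_cons, List.foldl_nil]
    rw [show ((1:Int) + ((p:Nat):Int)) = (((p+1:Nat)):Int) by push_cast; ring]
    rw [show ((((m+1:Nat)):Int) - 1) = ((m:Nat):Int) by push_cast; ring]
    rw [show ((((p+1:Nat)):Int) - 1) = ((p:Nat):Int) by push_cast; ring]
    simp only [PySem.List.pySetD_natCast, PySem.List.pyGetD_natCast]
    rw [pvSet_getD_self _ _ _ _ (by rw [hlen]; omega)]
    rw [pvSet_getD_ne _ _ _ _ _ (by omega : m + 1 ≠ m)]
    rw [pvTab_getD n m m (by omega), if_pos le_rfl, List.set_set]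
    rfl

theorem pvSetD_zero {α : Type} (l : List α) (v : α) : PySem.List.pySetD l 0 v = l.set 0 v := by
  rw [PySem.List.pySetD_of_nonneg _ _ (le_refl (0:Int))]
  norm_num

theorem pvInnerB (n m : Nat) (_hn : m + 1 < n) (p : Nat) :
    (PySem.List.pyRange 0 ((p:Int) + 1) 1).foldl
      (fun b j => PySem.List.pySetD b (((m+1 : Nat)) : Int)
        (PySem.List.pySetD (PySem.List.pyGetD b (((m+1:Nat)):Int) []) j
          (((((m+1:Nat)):Int).toNat.choose j.toNat : Nat) : Int)))
      (pvTab n m)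
    = (pvTab n m).set (m+1)
        (pvRowFillB (fun jj => (((m+1).choose jj : Nat) : Int)) (pvZrow n) p) := by
  have hlen : (pvTab n m).length = n := by simp [pvTab]
  induction p with
  | zero =>
    rw [show ((0:Nat):Int) + 1 = (0:Int) + 1 by norm_num, PySem.List.pyRange_one_singleton]
    simp only [List.foldl_cons, List.foldl_nil]
    simp only [PySem.List.pySetD_natCast, PySem.List.pyGetD_natCast]
    rw [pvTab_getD n m (m+1) (by omega), if_neg (by omega)]
    simp [pvRowFillB, pvSetD_zero]
  | succ p ih =>
    rw [show (((p+1:Nat)):Int) + 1 = ((p:Int) + 1) + 1 by push_cast; ring,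
        PySem.List.pyRange_one_succ_right (by omega), List.foldl_append, ih]
    simp only [List.foldl_cons, List.foldl_nil]
    rw [show ((p:Int) + 1) = (((p+1:Nat)):Int) by push_cast; ring]
    simp only [PySem.List.pySetD_natCast, PySem.List.pyGetD_natCast]
    rw [pvSet_getD_self _ _ _ _ (by rw [hlen]; omega)]
    rw [List.set_set]
    simp [pvRowFillB]

theorem pvTab_set_succ (n m : Nat) (_hmn : m + 1 < n) :
    (pvTab n m).set (m+1) (pvCrow n (m+1)) = pvTab n (m+1) := by
  apply List.ext_getElem (by simp [pvTab])
  intro k h1 h2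
  have hkn : k < n := by simpa [pvTab] using h2
  rw [List.getElem_set]
  simp only [pvTab, List.getElem_map, List.getElem_range]
  by_cases hk : m + 1 = k
  · subst hk; rw [if_pos rfl, if_pos le_rfl]
  · rw [if_neg hk]
    by_cases hkm : k ≤ m
    · rw [if_pos hkm, if_pos (by omega)]
    · rw [if_neg hkm, if_neg (by omega)]

theorem pvOuter (n m : Nat) (hmn : m + 1 < n) :
    pvOuterBody (pvTab n m) ((m+1 : Nat) : Int) = pvTab n (m+1) := by
  have hlen : (pvTab n m).length = n := by simp [pvTab]
  simp only [pvOuterBody]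
  rw [PySem.List.pyGetD_natCast, pvTab_getD n m (m+1) (by omega), if_neg (by omega)]
  rw [pvSetD_zero, PySem.List.pySetD_natCast]
  rw [show ((((m+1:Nat)):Int) + 1) = (1 + ((m+1:Nat):Int)) by ring]
  rw [pvInner n m hmn (m+1) _, pvRowFill_eq_crow n m hmn, pvTab_set_succ n m hmn]

theorem pvOuterB (n m : Nat) (hmn : m + 1 < n) :
    (PySem.List.pyRange 0 ((((m+1:Nat)):Int) + 1) 1).foldl
      (fun b j => PySem.List.pySetD b (((m+1 : Nat)) : Int)
        (PySem.List.pySetD (PySem.List.pyGetD b (((m+1:Nat)):Int) []) j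
          (((((m+1:Nat)):Int).toNat.choose j.toNat : Nat) : Int)))
      (pvTab n m)
    = pvTab n (m+1) := by
  rw [show ((((m+1:Nat)):Int) + 1) = (((m+1:Nat)):Int) + 1 from rfl]
  rw [pvInnerB n m hmn (m+1), pvRowFillB_eq_crow n m hmn, pvTab_set_succ n m hmn]

theorem pvFoldA (n : Nat) (hn : 1 ≤ n) (t : Nat) (ht : t ≤ n - 2) :
    (PySem.List.pyRange 1 (1 + (t:Int)) 1).foldl pvOuterBody (pvTab n 0) = pvTab n t := by
  induction t with
  | zero => rw [PySem.List.pyRange_one_eq_nil (by omega)]; rfl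
  | succ t ih =>
    rw [show ((1:Int) + ((t+1:Nat):Int)) = (1 + ((t:Nat):Int)) + 1 by push_cast; ring,
        PySem.List.pyRange_one_succ_right (by omega), List.foldl_append, ih (by omega)]
    simp only [List.foldl_cons, List.foldl_nil]
    rw [show ((1:Int) + ((t:Nat):Int)) = (((t+1:Nat)):Int) by push_cast; ring]
    exact pvOuter n t (by omega)

theorem pvFoldB (n : Nat) (hn : 1 ≤ n) (t : Nat) (ht : t ≤ n - 2) :
    (PySem.List.pyRange 1 (1 + (t:Int)) 1).foldl
      (fun b i => (PySem.List.pyRange 0 (i+1) 1).foldl (fun b j =>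
        PySem.List.pySetD b i (PySem.List.pySetD (PySem.List.pyGetD b i []) j
          ((i.toNat.choose j.toNat : Nat) : Int))) b)
      (pvTab n 0) = pvTab n t := by
  induction t with
  | zero => rw [PySem.List.pyRange_one_eq_nil (by omega)]; rfl
  | succ t ih =>
    rw [show ((1:Int) + ((t+1:Nat):Int)) = (1 + ((t:Nat):Int)) + 1 by push_cast; ring,
        PySem.List.pyRange_one_succ_right (by omega), List.foldl_append, ih (by omega)]
    simp only [List.foldl_cons, List.foldl_nil]
    rw [show ((1:Int) + ((t:Nat):Int)) = (((t+1:Nat)):Int) by push_cast; ring]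
    exact pvOuterB n t (by omega)

theorem pvConstRange {α : Type} (n : Nat) (x : α) :
    (PySem.List.pyRange 0 (n:Int) 1).map (fun _ => x) = List.replicate n x := by
  rw [List.map_const']
  congr 1
  rw [PySem.List.length_pyRange_one]
  simp

theorem pvInitCommon (n : Nat) (hn : 1 ≤ n) :
    PySem.List.pySetD (List.replicate n (List.replicate n (0:Int))) 0
      (PySem.List.pySetD
        (PySem.List.pyGetD (List.replicate n (List.replicate n (0:Int))) 0 []) 0 1)
    = pvTab n 0 := by
  rw [PySem.List.pyGetD_zero]
  rw [show (List.replicate n (List.replicate n (0:Int))).getD 0 [] = List.replicate n (0:Int) from by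
    have h0 : 0 < n := hn
    simp [List.getD_eq_getElem?_getD, h0]]
  rw [pvSetD_zero, pvSetD_zero]
  apply List.ext_getElem (by simp [pvTab])
  intro k h1 h2
  have hkn : k < n := by simpa [pvTab] using h2
  rw [List.getElem_set]
  simp only [pvTab, List.getElem_map, List.getElem_range, List.getElem_replicate]
  by_cases hk : 0 = k
  · cases hk; rw [if_pos rfl, if_pos le_rfl]; exact pvR0 n hn
  · rw [if_neg hk, if_neg (by omega)]; rfl

theorem pvBinomA_eq (LIM : Int) (h : 1 ≤ LIM) :
    pvBinomA LIM = pvTab LIM.toNat (LIM.toNat - 2) := by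
  obtain ⟨n, rfl⟩ : ∃ n : Nat, LIM = (n:Int) := ⟨LIM.toNat, by omega⟩
  have hn : 1 ≤ n := by exact_mod_cast h
  rw [Int.toNat_natCast]
  simp only [pvBinomA]
  rw [pvConstRange n ((0:Int)), pvConstRange n (List.replicate n (0:Int)), pvInitCommon n hn]
  rcases Nat.lt_or_ge n 2 with h2 | h2
  · have hn1 : n = 1 := by omega
    subst hn1
    rw [PySem.List.pyRange_one_eq_nil (by norm_num)]
    rfl
  · rw [show ((n:Int) - 1) = 1 + ((n-2:Nat):Int) by omega]
    exact pvFoldA n hn (n-2) le_rfl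

theorem pvBinomAlt_eq (LIM : Int) (h : 1 ≤ LIM) :
    pvBinomAlt LIM = pvTab LIM.toNat (LIM.toNat - 2) := by
  obtain ⟨n, rfl⟩ : ∃ n : Nat, LIM = (n:Int) := ⟨LIM.toNat, by omega⟩
  have hn : 1 ≤ n := by exact_mod_cast h
  rw [Int.toNat_natCast]
  simp only [pvBinomAlt]
  rw [show PySem.List.pyRepeat [(0:Int)] (n:Int) = List.replicate n (0:Int) from by
        rw [PySem.List.pyRepeat_singleton, Int.toNat_natCast]]
  rw [pvConstRange n (List.replicate n (0:Int)), pvInitCommon n hn]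
  rcases Nat.lt_or_ge n 2 with h2 | h2
  · have hn1 : n = 1 := by omega
    subst hn1
    rw [PySem.List.pyRange_one_eq_nil (by norm_num)]
    rfl
  · rw [show ((n:Int) - 1) = 1 + ((n-2:Nat):Int) by omega]
    exact pvFoldB n hn (n-2) le_rfl

-- ===== VERDICT (by name: the statement is the Claim_ definition above) =====
theorem initialize_arithmetic_functions_spec : Claim_equal_initialize_arithmetic_functions := by
  intro LIM _ hpre
  unfold Spec_initialize_arithmetic_functions initialize_arithmetic_functions initialize_arithmetic_functions_alt
  rw [pvBinomA_eq LIM hpre, pvBinomAlt_eq LIM hpre]
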